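-- pv_equiv track=rewrite | github.com/sourav03561/Numerlogy | personalityNumber.py | calculate_personality_number
-- ===== SOURCE A (Python) =====
-- def calculate_personality_number(name):
--     letter_values = {
--         'A': 1, 'I': 1, 'J': 1, 'Y': 1, 'Q': 1,
--         'B': 2, 'K': 2, 'R': 2,
--         'C': 3, 'G': 3, 'L': 3, 'S': 3,
--         'D': 4, 'M': 4, 'T': 4,
--         'E': 5, 'H': 5, 'N': 5,
--         'U': 6, 'V': 6, 'W': 6, 'X': 6,
--         'O': 7, 'Z': 7,
--         'P': 8, 'F': 8
--     }
--     name = name.upper()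
--     consonants = set(letter_values.keys()) - {'A', 'E', 'I', 'O', 'U'}
--
--     valid_consonants = []
--     words = name.split()
--
--     for word in words:
--         for i, char in enumerate(word):
--             if char in consonants:
--                 if char == 'Y' and i != 0:
--                     continue  # Skip 'Y' if it's not the first letter
--                 valid_consonants.append(letter_values[char])
--
--     personality_number = sum(valid_consonants)
--
--     # Reduce to single digit
--     while personality_number > 9 and personality_number not in {11, 22, 33}:
--         personality_number = sum(int(digit) for digit in str(personality_number))
--
--     return personality_number
-- ===== SOURCE B (Python) =====
-- # Single forward scan over the uppercased string with a word-start flag,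
-- # instead of split()-then-enumerate; digit reduction by a recursive helper.
--
-- _CONSONANT_VALUES = {
--     'B': 2, 'C': 3, 'D': 4, 'F': 8, 'G': 3, 'H': 5, 'J': 1, 'K': 2,
--     'L': 3, 'M': 4, 'N': 5, 'P': 8, 'Q': 1, 'R': 2, 'S': 3, 'T': 4,
--     'V': 6, 'W': 6, 'X': 6, 'Y': 1, 'Z': 7,
-- }
--
--
-- def _digital_root(n):
--     if n > 9 and n not in (11, 22, 33):
--         return _digital_root(sum(int(d) for d in str(n)))
--     return n
--
--
-- def calculate_personality_number(name):
--     total = 0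
--     at_word_start = True
--     for ch in name.upper():
--         if ch.isspace():
--             at_word_start = True
--         else:
--             if ch in _CONSONANT_VALUES and not (ch == 'Y' and not at_word_start):
--                 total += _CONSONANT_VALUES[ch]
--             at_word_start = False
--     return _digital_root(total)
-- ===== Notes on version B (the rewrite author's own statement) =====
-- stated objective: simpler
-- what changed: Replaces split()-into-words plus enumerate-index bookkeeping with one direct scan of the uppercased string that keeps an at-word-start flag (and a dict holding only consonant values), and replaces the while-loop digit reduction with a recursive digital-root helper.
import Mathlib
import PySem

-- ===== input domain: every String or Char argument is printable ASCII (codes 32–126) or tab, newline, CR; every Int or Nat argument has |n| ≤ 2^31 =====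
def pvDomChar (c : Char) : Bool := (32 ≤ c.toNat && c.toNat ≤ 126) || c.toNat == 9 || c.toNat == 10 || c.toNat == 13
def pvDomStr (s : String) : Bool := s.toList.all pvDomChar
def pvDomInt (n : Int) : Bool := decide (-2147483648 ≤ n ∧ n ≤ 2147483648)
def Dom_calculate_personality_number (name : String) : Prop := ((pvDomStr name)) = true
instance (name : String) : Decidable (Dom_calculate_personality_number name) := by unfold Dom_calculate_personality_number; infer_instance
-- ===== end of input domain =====

-- B is a different decomposition, not faster: one direct scan of the uppercased string with a
-- word-start flag replaces split()+enumerate, and a recursive digital root replaces the while loop.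

-- ===== PORT A =====
-- digit-sum machinery shared by both ports' reduction loops (both Pythons compute
-- 'sum(int(d) for d in str(n))'); the lemmas below are cited by their decreasing_by.
def pvNatDigSum (m : Nat) : Nat :=
  if m < 10 then m else m % 10 + pvNatDigSum (m / 10)
decreasing_by exact Nat.div_lt_self (by omega) (by omega)

theorem pvNatDigSum_le (m : Nat) : pvNatDigSum m ≤ m := by
  fun_induction pvNatDigSum with
  | case1 m h => exact Nat.le_refl m
  | case2 m h ih => omega

theorem pvNatDigSum_lt (m : Nat) (h : 10 ≤ m) : pvNatDigSum m < m := by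
  rw [pvNatDigSum, if_neg (by omega)]
  have := pvNatDigSum_le (m / 10)
  omega

theorem pvDigitCharVal (d : Nat) (h : d < 10) :
    ((Nat.digitChar d).toNat : Int) - 48 = (d : Int) := by
  interval_cases d <;> decide

theorem pvToDigitsCoreSum (f : Nat) : ∀ (m : Nat) (acc : List Char), m < f →
    ((Nat.toDigitsCore 10 f m acc).map (fun c => ((c.toNat : Int) - 48))).sum
      = (pvNatDigSum m : Int) + (acc.map (fun c => ((c.toNat : Int) - 48))).sum := by
  induction f with
  | zero => intro m acc h; omega
  | succ f ih =>
    intro m acc h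
    simp only [Nat.toDigitsCore]
    by_cases hn : m / 10 = 0
    · rw [if_pos hn]
      have hm : m < 10 := by omega
      simp only [List.map_cons, List.sum_cons]
      rw [pvDigitCharVal (m % 10) (by omega), pvNatDigSum, if_pos hm]
      have : m % 10 = m := Nat.mod_eq_of_lt hm
      rw [this]
    · rw [if_neg hn]
      have hge : 10 ≤ m := by omega
      have h1 : m / 10 < m := Nat.div_lt_self (by omega) (by omega)
      rw [ih (m / 10) _ (by omega)]
      simp only [List.map_cons, List.sum_cons]
      rw [pvDigitCharVal (m % 10) (by omega)]
      have hsum : pvNatDigSum m = m % 10 + pvNatDigSum (m / 10) := by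
        rw [pvNatDigSum, if_neg (by omega)]
      rw [hsum]
      push_cast
      ring

-- exact port of 'sum(int(d) for d in str(n))' for 0 ≤ n (str(n) is then all decimal digits,
-- and int(d) = ord(d) - 48); both reduction loops only call it with n > 9.
def pvDigitSum (n : Int) : Int :=
  ((PySem.Int.toChars n).map (fun c => ((c.toNat : Int) - 48))).sum

theorem pvDigitSum_eq (n : Int) (h : 0 ≤ n) : pvDigitSum n = (pvNatDigSum n.toNat : Int) := by
  unfold pvDigitSum PySem.Int.toChars
  rw [if_neg (by omega)]
  show ((Nat.toDigitsCore 10 (n.toNat + 1) n.toNat []).map _).sum = _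
  rw [pvToDigitsCoreSum (n.toNat + 1) n.toNat [] (by omega)]
  simp

theorem pvDigitSum_toNat_lt (n : Int) (h : 9 < n) : (pvDigitSum n).toNat < n.toNat := by
  rw [pvDigitSum_eq n (by omega)]
  have h1 := pvNatDigSum_lt n.toNat (by omega)
  omega

-- A's while loop: 'while pn > 9 and pn not in {11, 22, 33}: pn = sum(int(d) for d in str(pn))'
def pvReduceLoop (n : Int) : Int :=
  if h : 9 < n ∧ ¬(n = 11 ∨ n = 22 ∨ n = 33) then pvReduceLoop (pvDigitSum n) else n
termination_by n.toNat
decreasing_by exact pvDigitSum_toNat_lt n h.1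

def pvLetterValues : PySem.Dict Char Int :=
  ⟨[('A', 1), ('I', 1), ('J', 1), ('Y', 1), ('Q', 1),
    ('B', 2), ('K', 2), ('R', 2),
    ('C', 3), ('G', 3), ('L', 3), ('S', 3),
    ('D', 4), ('M', 4), ('T', 4),
    ('E', 5), ('H', 5), ('N', 5),
    ('U', 6), ('V', 6), ('W', 6), ('X', 6),
    ('O', 7), ('Z', 7),
    ('P', 8), ('F', 8)]⟩

def calculate_personality_number (name : String) : Int :=
  let up := PySem.Chars.upper name.toList
  let consonants : PySem.Set Char :=
    PySem.Set.diff (PySem.Set.ofList pvLetterValues.keys) (PySem.Set.ofList ['A', 'E', 'I', 'O', 'U'])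
  let valid : List Int :=
    (PySem.Chars.split₀ up).foldl (fun acc word =>
      (PySem.List.enumerate word).foldl (fun acc2 p =>
        if consonants.contains p.2 then
          if p.2 = 'Y' ∧ p.1 ≠ 0 then acc2
          else acc2 ++ [pvLetterValues.getD p.2 0]
        else acc2) acc) []
  pvReduceLoop valid.sum

-- ===== PORT B =====
def pvConsonantValues : PySem.Dict Char Int :=
  ⟨[('B', 2), ('C', 3), ('D', 4), ('F', 8), ('G', 3), ('H', 5), ('J', 1), ('K', 2),
    ('L', 3), ('M', 4), ('N', 5), ('P', 8), ('Q', 1), ('R', 2), ('S', 3), ('T', 4),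
    ('V', 6), ('W', 6), ('X', 6), ('Y', 1), ('Z', 7)]⟩

def pvDigitalRoot (n : Int) : Int :=
  if h : 9 < n ∧ n ≠ 11 ∧ n ≠ 22 ∧ n ≠ 33 then pvDigitalRoot (pvDigitSum n) else n
termination_by n.toNat
decreasing_by exact pvDigitSum_toNat_lt n h.1

def calculate_personality_number_alt (name : String) : Int :=
  let res := (PySem.Chars.upper name.toList).foldl (fun st ch =>
    if PySem.Chars.isspace ch then (st.1, true)
    else
      (if (pvConsonantValues.get? ch).isSome ∧ ¬(ch = 'Y' ∧ st.2 = false)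
         then st.1 + pvConsonantValues.getD ch 0 else st.1,
       false)) ((0 : Int), true)
  pvDigitalRoot res.1

-- ===== PRECONDITION & SPEC =====
def Spec_calculate_personality_number (name : String) (out : Int) : Prop := out = calculate_personality_number_alt name
instance (name : String) (out : Int) : Decidable (Spec_calculate_personality_number name out) := by unfold Spec_calculate_personality_number; infer_instance

-- ===== CLAIM (what is proved, stated in full; the proofs are below) =====
def Claim_equal_calculate_personality_number : Prop := ∀ (name : String), Dom_calculate_personality_number name → Spec_calculate_personality_number name (calculate_personality_number name)

-- ===== LEMMAS AND PROOFS =====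

theorem pvReduce_eq (n : Int) : pvReduceLoop n = pvDigitalRoot n := by
  fun_induction pvReduceLoop with
  | case1 n h ih => rw [pvDigitalRoot, dif_pos (by tauto)]; exact ih
  | case2 n h => rw [pvDigitalRoot, dif_neg (by tauto)]

-- per-char value as B computes it (flag = "at a word start")
def pvBVal (c : Char) (flag : Bool) : Int :=
  if (pvConsonantValues.get? c).isSome ∧ ¬(c = 'Y' ∧ flag = false) then pvConsonantValues.getD c 0
  else 0

-- per-char value as A computes it inside a word (z = "index is 0")
def pvAVal (c : Char) (z : Bool) : Int :=
  if ((PySem.Set.diff (PySem.Set.ofList pvLetterValues.keys)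
        (PySem.Set.ofList ['A', 'E', 'I', 'O', 'U'])).contains c) then
    if c = 'Y' ∧ z = false then 0 else pvLetterValues.getD c 0
  else 0

def pvConsList : List Char :=
  ['B', 'C', 'D', 'F', 'G', 'H', 'J', 'K', 'L', 'M', 'N', 'P', 'Q', 'R', 'S', 'T', 'V', 'W', 'X', 'Y', 'Z']

theorem pvMemB (c : Char) : (pvConsonantValues.get? c).isSome = (c ∈ pvConsList : Bool) := by
  simp only [pvConsonantValues, PySem.Dict.get?, Option.isSome_map]
  rw [List.isSome_find?]
  simp [pvConsList, List.any_cons, List.any_nil, Bool.beq_comm, Bool.beq_eq_decide_eq]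

theorem pvMemA (c : Char) :
    ((PySem.Set.diff (PySem.Set.ofList pvLetterValues.keys)
        (PySem.Set.ofList ['A', 'E', 'I', 'O', 'U'])).contains c) = (c ∈ pvConsList : Bool) := by
  have hset : PySem.Set.diff (PySem.Set.ofList pvLetterValues.keys)
      (PySem.Set.ofList ['A', 'E', 'I', 'O', 'U'])
      = ['J', 'Y', 'Q', 'B', 'K', 'R', 'C', 'G', 'L', 'S', 'D', 'M', 'T', 'H', 'N', 'V', 'W', 'X', 'Z', 'P', 'F'] := by decide
  rw [hset]
  simp only [PySem.Set.contains, List.contains_eq_mem, pvConsList]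
  rw [decide_eq_decide]
  exact (by decide : (['J', 'Y', 'Q', 'B', 'K', 'R', 'C', 'G', 'L', 'S', 'D', 'M', 'T', 'H', 'N', 'V',
    'W', 'X', 'Z', 'P', 'F'] : List Char).Perm ['B', 'C', 'D', 'F', 'G', 'H', 'J', 'K', 'L', 'M', 'N',
    'P', 'Q', 'R', 'S', 'T', 'V', 'W', 'X', 'Y', 'Z']).mem_iff

theorem pvStepEq (c : Char) (b : Bool) : pvAVal c b = pvBVal c b := by
  by_cases hm : c ∈ pvConsList
  · fin_cases hm <;> cases b <;> decide
  · unfold pvAVal pvBVal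
    rw [if_neg, if_neg]
    · rintro ⟨hc, -⟩
      rw [pvMemB] at hc
      simp [hm] at hc
    · rw [pvMemA]
      simp [hm]

-- B's scan, accumulator dropped
def pvScanB : List Char → Bool → Int
  | [], _ => 0
  | c :: s, flag =>
    if PySem.Chars.isspace c then pvScanB s true else pvBVal c flag + pvScanB s false

-- A's value of one complete word
def pvWordVal : List Char → Int
  | [] => 0
  | c :: r => pvAVal c true + (r.map (fun c => pvAVal c false)).sum

theorem pvWordVal_append (w : List Char) (c : Char) :
    pvWordVal (w ++ [c]) = pvWordVal w + pvAVal c w.isEmpty := by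
  cases w with
  | nil => simp [pvWordVal]
  | cons h t => simp [pvWordVal, List.map_append, List.sum_append]; ring

theorem pvInnerTail (w : List Char) : ∀ (acc : List Int) (s : Int), 1 ≤ s →
    ((PySem.List.enumerate w s).foldl (fun acc2 p =>
        if ((PySem.Set.diff (PySem.Set.ofList pvLetterValues.keys)
              (PySem.Set.ofList ['A', 'E', 'I', 'O', 'U'])).contains p.2) then
          if p.2 = 'Y' ∧ p.1 ≠ 0 then acc2
          else acc2 ++ [pvLetterValues.getD p.2 0]
        else acc2) acc).sum = acc.sum + (w.map (fun c => pvAVal c false)).sum := by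
  induction w with
  | nil => intro acc s _; simp [PySem.List.enumerate_nil]
  | cons c r ih =>
    intro acc s hs
    rw [PySem.List.enumerate_cons]
    simp only [List.foldl_cons]
    have hz : (c = 'Y' ∧ s ≠ 0) ↔ (c = 'Y') := by constructor <;> intro h <;> [exact h.1; exact ⟨h, by omega⟩]
    by_cases hc : ((PySem.Set.diff (PySem.Set.ofList pvLetterValues.keys)
        (PySem.Set.ofList ['A', 'E', 'I', 'O', 'U'])).contains c)
    · rw [if_pos hc]
      by_cases hy : c = 'Y'
      · rw [if_pos (by exact ⟨hy, by omega⟩), ih acc (s+1) (by omega)]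
        have hv : pvAVal c false = 0 := by rw [pvAVal, if_pos hc, if_pos ⟨hy, rfl⟩]
        simp [List.map_cons, List.sum_cons, hv]
      · rw [if_neg (by tauto), ih (acc ++ [pvLetterValues.getD c 0]) (s+1) (by omega)]
        simp only [List.map_cons, List.sum_cons, List.sum_append, List.sum_cons, List.sum_nil]
        have hv : pvAVal c false = pvLetterValues.getD c 0 := by
          rw [pvAVal, if_pos hc, if_neg (by simp [hy])]
        rw [hv]; ring
    · rw [if_neg hc, ih acc (s+1) (by omega)]
      have hv : pvAVal c false = 0 := by rw [pvAVal, if_neg hc]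
      simp [List.map_cons, List.sum_cons, hv]

theorem pvInnerSum (w : List Char) (acc : List Int) :
    ((PySem.List.enumerate w).foldl (fun acc2 p =>
        if ((PySem.Set.diff (PySem.Set.ofList pvLetterValues.keys)
              (PySem.Set.ofList ['A', 'E', 'I', 'O', 'U'])).contains p.2) then
          if p.2 = 'Y' ∧ p.1 ≠ 0 then acc2
          else acc2 ++ [pvLetterValues.getD p.2 0]
        else acc2) acc).sum = acc.sum + pvWordVal w := by
  cases w with
  | nil => simp [PySem.List.enumerate, pvWordVal]
  | cons c r =>
    show ((PySem.List.enumerate (c :: r) 0).foldl _ acc).sum = _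
    rw [PySem.List.enumerate_cons]
    simp only [List.foldl_cons, zero_add]
    by_cases hc : ((PySem.Set.diff (PySem.Set.ofList pvLetterValues.keys)
        (PySem.Set.ofList ['A', 'E', 'I', 'O', 'U'])).contains c)
    · rw [if_pos hc, if_neg (by simp), pvInnerTail r _ 1 (by omega)]
      have hv : pvAVal c true = pvLetterValues.getD c 0 := by
        rw [pvAVal, if_pos hc, if_neg (by simp)]
      simp only [pvWordVal, List.sum_append, List.sum_cons, List.sum_nil, hv]
      ring
    · rw [if_neg hc, pvInnerTail r _ 1 (by omega)]
      have hv : pvAVal c true = 0 := by rw [pvAVal, if_neg hc]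
      simp [pvWordVal, hv]

theorem pvOuterSum (words : List (List Char)) (acc : List Int) :
    (words.foldl (fun acc word =>
      (PySem.List.enumerate word).foldl (fun acc2 p =>
        if ((PySem.Set.diff (PySem.Set.ofList pvLetterValues.keys)
              (PySem.Set.ofList ['A', 'E', 'I', 'O', 'U'])).contains p.2) then
          if p.2 = 'Y' ∧ p.1 ≠ 0 then acc2
          else acc2 ++ [pvLetterValues.getD p.2 0]
        else acc2) acc) acc).sum = acc.sum + (words.map pvWordVal).sum := by
  induction words generalizing acc with
  | nil => simp
  | cons w ws ih =>
    simp only [List.foldl_cons, List.map_cons, List.sum_cons]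
    rw [ih, pvInnerSum]
    ring

theorem pvGoSum (s : List Char) : ∀ (cur : List Char) (accw : List (List Char)),
    ((PySem.Chars.split₀.go s cur accw).map pvWordVal).sum
      = (accw.map pvWordVal).sum + pvWordVal cur.reverse + pvScanB s cur.isEmpty := by
  induction s with
  | nil =>
    intro cur accw
    rw [PySem.Chars.split₀.go]
    cases cur with
    | nil => simp [pvScanB, pvWordVal]
    | cons c t =>
      simp [pvScanB, List.map_reverse, List.sum_reverse]
  | cons c s ih =>
    intro cur accw
    rw [PySem.Chars.split₀.go]
    by_cases hsp : PySem.Chars.isspace c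
    · rw [if_pos hsp]
      cases cur with
      | nil =>
        rw [if_pos (by simp)]
        simp [ih, pvScanB, hsp, pvWordVal]
      | cons c0 t =>
        rw [if_neg (by simp)]
        rw [ih]
        simp [pvScanB, hsp, pvWordVal]
        ring
    · rw [if_neg hsp, ih]
      have : (c :: cur).reverse = cur.reverse ++ [c] := by simp
      rw [this, pvWordVal_append]
      have hb : pvAVal c cur.reverse.isEmpty = pvBVal c cur.isEmpty := by
        rw [pvStepEq]
        congr 1
        cases cur <;> simp
      rw [hb]
      cases hcur : cur.isEmpty <;> simp [pvScanB, hsp] <;> ring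

theorem pvScanBFoldl (s : List Char) : ∀ (tot : Int) (flag : Bool),
    (s.foldl (fun st ch =>
      if PySem.Chars.isspace ch then (st.1, true)
      else
        (if (pvConsonantValues.get? ch).isSome ∧ ¬(ch = 'Y' ∧ st.2 = false)
           then st.1 + pvConsonantValues.getD ch 0 else st.1,
         false)) (tot, flag)).1 = tot + pvScanB s flag := by
  induction s with
  | nil => intro tot flag; simp [pvScanB]
  | cons c s ih =>
    intro tot flag
    simp only [List.foldl_cons]
    by_cases hsp : PySem.Chars.isspace c
    · rw [if_pos hsp, ih]
      simp [pvScanB, hsp]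
    · rw [if_neg hsp]
      by_cases hc : (pvConsonantValues.get? c).isSome ∧ ¬(c = 'Y' ∧ flag = false)
      · rw [if_pos hc, ih]
        have hv : pvBVal c flag = pvConsonantValues.getD c 0 := by rw [pvBVal, if_pos hc]
        simp [pvScanB, hsp, hv]
        ring
      · rw [if_neg hc, ih]
        have hv : pvBVal c flag = 0 := by rw [pvBVal, if_neg hc]
        simp [pvScanB, hsp, hv]

-- ===== VERDICT (by name: the statement is the Claim_ definition above) =====
theorem calculate_personality_number_spec : Claim_equal_calculate_personality_number := by
  intro name _
  unfold Spec_calculate_personality_number calculate_personality_number calculate_personality_number_alt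
  dsimp only
  rw [pvOuterSum, pvScanBFoldl, pvReduce_eq]
  have h := pvGoSum (PySem.Chars.upper name.toList) [] []
  simp only [PySem.Chars.split₀] at *
  rw [h]
  simp [pvWordVal]
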